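-- pv_equiv track=rewrite | github.com/KREEAL/python_labs | Laba2/laba2.py | fourth_task
-- ===== SOURCE A (Python) =====
-- def fourth_task(l: list) -> int:
--     localc_maxs = []
--     for i in range(0, len(l)):
--         if i == 0:
--             if l[i] > l[i + 1]:
--                 localc_maxs.append(i)
--         if i == len(l) - 1:
--             if l[i] > l[i - 1]:
--                 localc_maxs.append(i)
--         if 0 < i < len(l) - 1:
--             if l[i - 1] < l[i] > l[i + 1]:
--                 localc_maxs.append(i)
--     min_len = 0
--     current_len = len(localc_maxs)
--     for i in range(0, len(localc_maxs)):
--         for j in range(i, len(localc_maxs)):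
--             current_len = localc_maxs[j] - localc_maxs[i]
--             if min_len < current_len:
--                 min_len = current_len
--
--     return min_len
-- ===== SOURCE B (Python) =====
-- def fourth_task(l: list) -> int:
--     n = len(l)
--
--     def is_max(i):
--         return (i == 0 or l[i - 1] < l[i]) and (i == n - 1 or l[i] > l[i + 1])
--
--     first = next((i for i in range(n) if is_max(i)), None)
--     if first is None:
--         return 0
--     last = next(i for i in reversed(range(n)) if is_max(i))
--     return last - first
-- ===== Notes on version B (the rewrite author's own statement) =====
-- stated objective: faster
-- what changed: B drops A's list of all local-maxima indices and its quadratic scan over every index pair: since the indices come in ascending order the largest gap is simply (last maximum index) - (first maximum index), found by one forward and one backward short-circuiting scan.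
import Mathlib
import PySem

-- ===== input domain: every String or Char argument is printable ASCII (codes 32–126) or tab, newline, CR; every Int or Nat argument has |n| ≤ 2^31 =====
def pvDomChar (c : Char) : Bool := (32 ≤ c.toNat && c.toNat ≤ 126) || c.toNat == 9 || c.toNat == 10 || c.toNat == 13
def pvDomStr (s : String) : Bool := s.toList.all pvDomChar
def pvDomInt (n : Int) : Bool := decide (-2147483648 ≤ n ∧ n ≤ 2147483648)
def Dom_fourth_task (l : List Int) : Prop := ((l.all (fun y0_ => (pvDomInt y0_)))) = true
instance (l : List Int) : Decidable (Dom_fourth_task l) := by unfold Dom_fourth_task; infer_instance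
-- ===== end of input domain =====

-- B replaces A's quadratic scan over all pairs of local-maxima indices by "last maximum index minus
-- first maximum index" (the collected indices are ascending), found by one forward and one backward scan.

-- ===== PORT A =====
-- one iteration of A's first loop (the three conditional appends, in A's order)
def pvAstep (l : List Int) (n : Int) (acc : List Int) (i : Int) : List Int :=
  let acc1 := if i = 0 then
      (if PySem.List.pyGetD l i 0 > PySem.List.pyGetD l (i+1) 0 then acc ++ [i] else acc)
    else acc
  let acc2 := if i = n - 1 then
      (if PySem.List.pyGetD l i 0 > PySem.List.pyGetD l (i-1) 0 then acc1 ++ [i] else acc1)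
    else acc1
  if 0 < i ∧ i < n - 1 then
      (if PySem.List.pyGetD l (i-1) 0 < PySem.List.pyGetD l i 0 ∧ PySem.List.pyGetD l i 0 > PySem.List.pyGetD l (i+1) 0
       then acc2 ++ [i] else acc2)
    else acc2

-- A's second part: min_len = max over all index pairs i ≤ j of localc_maxs[j] - localc_maxs[i], from 0
def pvPairLoop (M : List Int) : Int :=
  let m : Int := PySem.List.len M
  (PySem.List.pyRange 0 m).foldl (fun min_len i =>
    (PySem.List.pyRange i m).foldl (fun ml j =>
      let current_len := PySem.List.pyGetD M j 0 - PySem.List.pyGetD M i 0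
      if ml < current_len then current_len else ml) min_len) 0

def fourth_task (l : List Int) : Int :=
  pvPairLoop ((PySem.List.pyRange 0 (PySem.List.len l)).foldl (pvAstep l (PySem.List.len l)) [])

-- ===== PORT B =====
-- B's is_max(i); Python's short-circuit or/and become Bool || / &&
def pvIsMax (l : List Int) (n i : Int) : Bool :=
  (decide (i = 0) || decide (PySem.List.pyGetD l (i-1) 0 < PySem.List.pyGetD l i 0)) &&
  (decide (i = n - 1) || decide (PySem.List.pyGetD l i 0 > PySem.List.pyGetD l (i+1) 0))

def fourth_task_alt (l : List Int) : Int :=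
  match (PySem.List.pyRange 0 (PySem.List.len l)).find? (pvIsMax l (PySem.List.len l)) with
  | none => 0
  | some first =>
    match ((PySem.List.pyRange 0 (PySem.List.len l)).reverse).find? (pvIsMax l (PySem.List.len l)) with
    | none => 0
    | some last => last - first

-- ===== PRECONDITION & SPEC =====
-- Pre_ excludes exactly the singleton list, on which A raises IndexError (l[i+1] at i = 0).
def Pre_fourth_task (l : List Int) : Prop := l.length ≠ 1
instance (l : List Int) : Decidable (Pre_fourth_task l) := by unfold Pre_fourth_task; infer_instance

def pvWitness_fourth_task : List Int := [3, 1]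

def Spec_fourth_task (l : List Int) (out : Int) : Prop := out = fourth_task_alt l
instance (l : List Int) (out : Int) : Decidable (Spec_fourth_task l out) := by unfold Spec_fourth_task; infer_instance

-- ===== CLAIM (what is proved, stated in full; the proofs are below) =====
def Claim_equal_fourth_task : Prop := ∀ (l : List Int), Dom_fourth_task l → Pre_fourth_task l → Spec_fourth_task l (fourth_task l)

-- ===== LEMMAS AND PROOFS =====

-- generic fold bounds
theorem pv_le_foldl (f : Int → Int → Int) (h : ∀ acc x, acc ≤ f acc x) :
    ∀ (l : List Int) (init : Int), init ≤ l.foldl f init := by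
  intro l
  induction l with
  | nil => intro init; simp
  | cons a t ih => intro init; exact le_trans (h init a) (ih (f init a))

theorem pv_foldl_le (f : Int → Int → Int) (B : Int) :
    ∀ (l : List Int) (init : Int), (∀ acc, ∀ x ∈ l, f acc x ≤ max acc B) →
      l.foldl f init ≤ max init B := by
  intro l
  induction l with
  | nil => intro init _; simp
  | cons a t ih =>
    intro init h
    have h1 : t.foldl f (f init a) ≤ max (f init a) B :=
      ih (f init a) (fun acc x hx => h acc x (List.mem_cons_of_mem _ hx))
    calc t.foldl f (f init a) ≤ max (f init a) B := h1
      _ ≤ max (max init B) B := max_le_max_right B (h init a (List.mem_cons_self))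
      _ = max init B := by rw [max_assoc, max_self]

theorem pv_foldl_ge (f : Int → Int → Int) (h : ∀ acc x, acc ≤ f acc x) (v : Int)
    (x : Int) (hv : ∀ acc, v ≤ f acc x) :
    ∀ (l : List Int) (init : Int), x ∈ l → v ≤ l.foldl f init := by
  intro l
  induction l with
  | nil => intro init hx; simp at hx
  | cons a t ih =>
    intro init hx
    rcases List.mem_cons.mp hx with rfl | hx
    · exact le_trans (hv init) (pv_le_foldl f h t (f init x))
    · exact ih (f init a) hx

theorem pv_len_eq (l : List Int) : PySem.List.len l = (l.length : Int) := by
  simp [PySem.List.len]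

-- A's first loop builds exactly the filter of B's is_max over range(len(l)) (when len(l) ≠ 1)
theorem pv_maxs_eq (l : List Int) (hl : l.length ≠ 1) :
    (PySem.List.pyRange 0 (PySem.List.len l)).foldl (pvAstep l (PySem.List.len l)) []
      = (PySem.List.pyRange 0 (PySem.List.len l)).filter (pvIsMax l (PySem.List.len l)) := by
  have hn : PySem.List.len l = (l.length : Int) := pv_len_eq l
  rw [PySem.List.foldl_congr_mem _ _ (fun acc i => if pvIsMax l (PySem.List.len l) i then acc ++ [i] else acc) _ ?_]
  · rw [PySem.List.foldl_append_if_eq_filter]; simp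
  · intro acc i hi
    rw [hn] at hi ⊢
    obtain ⟨h0, h1⟩ := PySem.List.mem_pyRange_one.mp hi
    have h2 : 2 ≤ (l.length : Int) := by omega
    unfold pvAstep pvIsMax
    by_cases hi0 : i = 0
    · subst hi0
      simp [show ¬((0 : Int) = (l.length : Int) - 1) by omega]
    · by_cases hin : i = (l.length : Int) - 1
      · subst hin
        simp [show ¬((l.length : Int) - 1 = 0) by omega]
      · simp [hi0, hin, show 0 < i by omega, show i < (l.length : Int) - 1 by omega]

-- range(n) is strictly increasing, hence so is the filtered maxima list
theorem pv_maxs_pairwise (l : List Int) :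
    ((PySem.List.pyRange 0 (PySem.List.len l)).filter (pvIsMax l (PySem.List.len l))).Pairwise (· < ·) := by
  have h : (PySem.List.pyRange 0 (PySem.List.len l)).Pairwise (· < ·) := by
    rw [pv_len_eq, PySem.List.pyRange_zero_natCast]
    exact (List.pairwise_lt_range).map _ (by intro a b hab; exact_mod_cast hab)
  exact List.Pairwise.sublist List.filter_sublist h

-- the value of A's nested pair loop over a strictly increasing nonempty list
theorem pv_nested (M : List Int) (hp : M.Pairwise (· < ·)) (hne : M ≠ []) :
    pvPairLoop M = M.getLast hne - M.head hne := by
  have hlen : 0 < M.length := List.length_pos_iff.mpr hne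
  have hget : ∀ (i : Int) (h0 : 0 ≤ i) (h1 : i < (M.length : Int)),
      PySem.List.pyGetD M i 0 = M[i.toNat]'(by omega) := by
    intro i h0 h1
    rw [PySem.List.pyGetD_of_nonneg M 0 h0, List.getD_eq_getElem]
  have hmono : ∀ (p q : Nat) (hpq : p ≤ q) (hq : q < M.length), M[p]'(by omega) ≤ M[q] := by
    intro p q hpq hq
    rcases Nat.eq_or_lt_of_le hpq with rfl | hlt
    · exact le_refl _
    · exact le_of_lt (List.pairwise_iff_getElem.mp hp p q (by omega) hq hlt)
  have hhead : M.head hne = M[0] := List.head_eq_getElem hne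
  have hlast : M.getLast hne = M[M.length - 1]'(by omega) := List.getLast_eq_getElem hne
  set B : Int := M.getLast hne - M.head hne with hB
  have hBnn : 0 ≤ B := by
    rw [hB, hhead, hlast]; have := hmono 0 (M.length - 1) (by omega) (by omega); omega
  have hcand : ∀ i j : Int, 0 ≤ i → i ≤ j → j < (M.length : Int) →
      PySem.List.pyGetD M j 0 - PySem.List.pyGetD M i 0 ≤ B := by
    intro i j h0 hij hj
    rw [hget i h0 (by omega), hget j (by omega) hj, hB, hhead, hlast]
    have h1 := hmono 0 i.toNat (by omega) (by omega)
    have h2 := hmono j.toNat (M.length - 1) (by omega) (by omega)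
    omega
  simp only [pvPairLoop, PySem.List.len]
  have hstep : ∀ (i : Int) (acc j : Int), acc ≤ (fun ml j =>
      let current_len := PySem.List.pyGetD M j 0 - PySem.List.pyGetD M i 0
      if ml < current_len then current_len else ml) acc j := by
    intro i acc j; simp only; split <;> omega
  have houter_mono : ∀ acc i, acc ≤ (PySem.List.pyRange i (M.length : Int)).foldl (fun ml j =>
      let current_len := PySem.List.pyGetD M j 0 - PySem.List.pyGetD M i 0
      if ml < current_len then current_len else ml) acc :=
    fun acc i => pv_le_foldl _ (hstep i) _ acc
  apply le_antisymm
  · have := pv_foldl_le (fun min_len i =>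
      (PySem.List.pyRange i (M.length : Int)).foldl (fun ml j =>
        let current_len := PySem.List.pyGetD M j 0 - PySem.List.pyGetD M i 0
        if ml < current_len then current_len else ml) min_len) B (PySem.List.pyRange 0 (M.length : Int)) 0 ?_
    · simpa [max_eq_right hBnn] using this
    · intro acc i hi
      obtain ⟨hi0, hi1⟩ := PySem.List.mem_pyRange_one.mp hi
      apply pv_foldl_le
      intro acc' j hj
      obtain ⟨hj0, hj1⟩ := PySem.List.mem_pyRange_one.mp hj
      have := hcand i j hi0 hj0 hj1
      simp only; split
      · exact le_trans this (le_max_right _ _)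
      · exact le_max_left _ _
  · apply pv_foldl_ge _ houter_mono B 0 ?_ _ 0 (PySem.List.mem_pyRange_one.mpr ⟨le_refl 0, by exact_mod_cast hlen⟩)
    intro acc
    apply pv_foldl_ge _ (hstep 0) B ((M.length : Int) - 1) ?_ _ acc
        (PySem.List.mem_pyRange_one.mpr ⟨by omega, by omega⟩)
    intro ml
    have : PySem.List.pyGetD M ((M.length : Int) - 1) 0 - PySem.List.pyGetD M 0 0 = B := by
      rw [hget _ (by omega) (by omega), hget 0 (by omega) (by exact_mod_cast hlen), hB, hhead, hlast]
      have hidx : ((M.length : Int) - 1).toNat = M.length - 1 := by omega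
      simp [hidx]
    simp only; split <;> omega

-- ===== VERDICT (by name: the statement is the Claim_ definition above) =====
theorem fourth_task_spec : Claim_equal_fourth_task := by
  intro l _ hpre
  unfold Spec_fourth_task fourth_task fourth_task_alt
  rw [pv_maxs_eq l hpre]
  have hfind : (PySem.List.pyRange 0 (PySem.List.len l)).find? (pvIsMax l (PySem.List.len l))
      = ((PySem.List.pyRange 0 (PySem.List.len l)).filter (pvIsMax l (PySem.List.len l))).head? :=
    (List.head?_filter).symm
  have hfindr : ((PySem.List.pyRange 0 (PySem.List.len l)).reverse).find? (pvIsMax l (PySem.List.len l))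
      = ((PySem.List.pyRange 0 (PySem.List.len l)).filter (pvIsMax l (PySem.List.len l))).getLast? := by
    rw [← List.head?_filter, List.filter_reverse, List.head?_reverse]
  rw [hfind, hfindr]
  by_cases hM : (PySem.List.pyRange 0 (PySem.List.len l)).filter (pvIsMax l (PySem.List.len l)) = []
  · rw [hM]
    simp [pvPairLoop]
  · rw [List.head?_eq_some_head hM, List.getLast?_eq_some_getLast hM,
        pv_nested _ (pv_maxs_pairwise l) hM]
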